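-- pv_equiv track=rewrite | github.com/rmh2805/WikiScrape | wikiScrape.py | skipAngles
-- ===== SOURCE A (Python) =====
-- def skipAngles(line, i):
--     if line is None:
--         return i
--
--     while i < len(line):
--         ch = line[i]
--         if ch == '>':
--             return i + 1    # Return next char after my block closes
--         elif ch == '<':
--             i = skipAngles(line, i + 1)  # Skip next set of angles
--         else:
--             i += 1
-- ===== SOURCE B (Python) =====
-- def skipAngles(line, i):
--     if line is None:
--         return i
--     depth = 0
--     while i < len(line):
--         ch = line[i]
--         if ch == '>':
--             if depth == 0:
--                 return i + 1
--             depth -= 1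
--         elif ch == '<':
--             depth += 1
--         i += 1
-- ===== Notes on version B (the rewrite author's own statement) =====
-- stated objective: simpler
-- what changed: Replaced A's recursion (a recursive call per nested '<' block, with the while-loop resuming at the returned index) by a single non-recursive loop over the string maintaining an integer depth counter.
-- outside the precondition, e.g. on skipAngles('abc', 0): A returns None, B returns None; on skipAngles('a<b', 0): A raises TypeError, B returns None; on skipAngles('ab', -5): A raises IndexError, B raises IndexError
import Mathlib
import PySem

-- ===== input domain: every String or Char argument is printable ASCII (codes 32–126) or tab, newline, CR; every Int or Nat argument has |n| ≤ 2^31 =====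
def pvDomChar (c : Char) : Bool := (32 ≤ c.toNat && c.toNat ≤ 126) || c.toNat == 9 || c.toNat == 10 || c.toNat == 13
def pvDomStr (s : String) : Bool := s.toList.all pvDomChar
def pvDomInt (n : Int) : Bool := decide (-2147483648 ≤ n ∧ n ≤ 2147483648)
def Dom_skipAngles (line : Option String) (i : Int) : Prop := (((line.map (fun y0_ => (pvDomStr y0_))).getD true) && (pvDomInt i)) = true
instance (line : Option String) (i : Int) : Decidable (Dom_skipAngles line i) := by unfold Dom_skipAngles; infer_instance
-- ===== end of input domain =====

-- B replaces A's per-block recursion with one non-recursive depth-counter loop (return value only; neither mutates).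

-- ===== PORT A =====
-- A's while-loop-with-recursion; `none` models Python returning None / raising
-- (TypeError from a None nested result, IndexError from line[i] with i < -len).
-- The fuel argument only makes the recursion total: indices strictly increase,
-- so (len - i).toNat + 1 steps always suffice.
def helpA : Nat → List Char → Int → Option Int
  | 0, _, _ => none
  | n+1, s, i =>
    if i < (s.length : Int) then
      match PySem.List.pyGet? s i with
      | none => none
      | some c =>
        if c = '>' then some (i + 1)
        else if c = '<' then
          match helpA n s (i + 1) with
          | none => none
          | some j => helpA n s j
        else helpA n s (i + 1)
    else none

def skipAngles (line : Option String) (i : Int) : Int :=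
  match line with
  | none => i
  | some s => (helpA (((s.toList.length : Int) - i).toNat + 1) s.toList i).getD 0

-- ===== PORT B =====
-- B's single loop with an integer depth counter; `none` models falling off the
-- end (Python None) or IndexError, as in port A.
def helpB (s : List Char) (i : Int) (depth : Int) : Option Int :=
  if i < (s.length : Int) then
    match PySem.List.pyGet? s i with
    | none => none
    | some c =>
      if c = '>' then
        if depth = 0 then some (i + 1) else helpB s (i + 1) (depth - 1)
      else if c = '<' then helpB s (i + 1) (depth + 1)
      else helpB s (i + 1) depth
    else none
termination_by ((s.length : Int) - i).toNat
decreasing_by all_goals omega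

def skipAngles_alt (line : Option String) (i : Int) : Int :=
  match line with
  | none => i
  | some s => (helpB s.toList i 0).getD 0

-- ===== PRECONDITION & SPEC =====
-- The chars A actually scans from index i (Python's negative indices read from the end).
def pvScanned (s : List Char) (i : Int) : List Char :=
  if 0 ≤ i then s.drop i.toNat else s.drop (s.length + i).toNat ++ s

-- Pre_ excludes exactly the inputs where Python A does not return an int:
-- i < -len(line) (IndexError), and scans in which no '>' is ever reached at
-- nesting depth 0 (A falls off the end returning None, or raises TypeError
-- propagating a nested None).
def Pre_skipAngles (line : Option String) (i : Int) : Prop :=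
  ∀ str ∈ line,
    -((str.toList.length : Int)) ≤ i ∧
    ∃ j < (pvScanned str.toList i).length,
      (pvScanned str.toList i)[j]? = some '>' ∧
      ((pvScanned str.toList i).take j).count '<' = ((pvScanned str.toList i).take j).count '>'

instance (line : Option String) (i : Int) : Decidable (Pre_skipAngles line i) := by
  unfold Pre_skipAngles; infer_instance

def pvWitness_skipAngles : Option String × Int := (some "a<b>c>", 0)

def Spec_skipAngles (line : Option String) (i : Int) (out : Int) : Prop := out = skipAngles_alt line i
instance (line : Option String) (i : Int) (out : Int) : Decidable (Spec_skipAngles line i out) := by unfold Spec_skipAngles; infer_instance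

-- ===== CLAIM (what is proved, stated in full; the proofs are below) =====
def Claim_equal_skipAngles : Prop := ∀ (line : Option String) (i : Int), Dom_skipAngles line i → Pre_skipAngles line i → Spec_skipAngles line i (skipAngles line i)

-- ===== LEMMAS AND PROOFS =====

-- B's loop only ever returns an index strictly beyond where it started.
theorem helpB_lt (s : List Char) : ∀ i d j, helpB s i d = some j → i < j := by
  intro i d j h
  rw [helpB] at h
  by_cases hi : i < (s.length : Int)
  · rw [if_pos hi] at h
    cases hg : PySem.List.pyGet? s i with
    | none => rw [hg] at h; cases h
    | some c =>
      rw [hg] at h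
      simp only at h
      split_ifs at h
      · simp only [Option.some.injEq] at h; omega
      · have := helpB_lt s (i+1) (d-1) j h; omega
      · have := helpB_lt s (i+1) (d+1) j h; omega
      · have := helpB_lt s (i+1) d j h; omega
  · rw [if_neg hi] at h; cases h
termination_by i => ((s.length : Int) - i).toNat
decreasing_by all_goals omega

-- Skipping d+e+1 unmatched '>' = skip d+1, then continue and skip e more.
theorem helpB_comp (s : List Char) : ∀ i (d e : Int), 0 ≤ d → 0 ≤ e →
    helpB s i (d + e + 1) = (helpB s i d).bind (fun j => helpB s j e) := by
  intro i d e hd he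
  by_cases hi : i < (s.length : Int)
  · conv_lhs => rw [helpB]
    conv_rhs => rw [helpB]
    simp only [if_pos hi]
    cases hg : PySem.List.pyGet? s i with
    | none => rfl
    | some c =>
      simp only
      by_cases hgt : c = '>'
      · simp only [if_pos hgt]
        by_cases h0 : d = 0
        · subst h0
          simp only [if_neg (show ¬((0:Int)+e+1) = 0 by omega)]
          rw [show (0:Int)+e+1-1 = e by ring]
          rfl
        · simp only [if_neg h0, if_neg (show ¬(d+e+1:Int) = 0 by omega)]
          rw [show d + e + 1 - 1 = (d-1) + e + 1 by ring,
              helpB_comp s (i+1) (d-1) e (by omega) he]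
      · by_cases hlt : c = '<'
        · simp only [if_neg hgt, if_pos hlt]
          rw [show d + e + 1 + 1 = (d+1) + e + 1 by ring,
              helpB_comp s (i+1) (d+1) e (by omega) he]
        · simp only [if_neg hgt, if_neg hlt]
          exact helpB_comp s (i+1) d e hd he
  · conv_lhs => rw [helpB]
    conv_rhs => rw [helpB]
    simp only [if_neg hi]
    rfl
termination_by i => ((s.length : Int) - i).toNat
decreasing_by all_goals omega

-- With enough fuel, A's recursion computes exactly B's depth-0 loop.
theorem helpA_eq_helpB (s : List Char) :
    ∀ n i, ((s.length : Int) - i).toNat ≤ n → helpA n s i = helpB s i 0 := by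
  intro n
  induction n with
  | zero =>
    intro i h
    have hi : ¬ i < (s.length : Int) := by omega
    rw [helpA, helpB, if_neg hi]
  | succ n ih =>
    intro i h
    rw [helpA]
    conv_rhs => rw [helpB]
    by_cases hi : i < (s.length : Int)
    · simp only [if_pos hi]
      cases hg : PySem.List.pyGet? s i with
      | none => rfl
      | some c =>
        simp only
        by_cases hgt : c = '>'
        · simp [hgt]
        · by_cases hlt : c = '<'
          · -- '<' branch: A recurses then resumes; B bumps depth, which
            -- helpB_comp splits into the same two stages.
            simp only [if_neg hgt, if_pos hlt]
            have h1 : helpA n s (i+1) = helpB s (i+1) 0 := ih (i+1) (by omega)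
            have h2 := helpB_comp s (i+1) 0 0 le_rfl le_rfl
            rw [show (0:Int)+0+1 = 1 by ring] at h2
            rw [show (0:Int)+1 = 1 by ring, h2, h1]
            cases hb : helpB s (i+1) 0 with
            | none => rfl
            | some j =>
              have hj := helpB_lt s (i+1) 0 j hb
              simp only [Option.bind_some]
              exact ih j (by omega)
          · simp only [if_neg hgt, if_neg hlt]
            exact ih (i+1) (by omega)
    · simp only [if_neg hi]

-- ===== VERDICT (by name: the statement is the Claim_ definition above) =====
theorem skipAngles_spec : Claim_equal_skipAngles := by
  intro line i _ _
  unfold Spec_skipAngles skipAngles skipAngles_alt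
  cases line with
  | none => rfl
  | some s =>
    simp only
    rw [helpA_eq_helpB s.toList _ i (by omega)]
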